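-- pv_equiv track=rewrite | github.com/karldw/pudl-zenodo-storage | bin/zen_store.py | action_steps
-- ===== SOURCE A (Python) =====
-- def action_steps(new_files, old_files):
--     """
--     Determine which files need to be created, updated, and deleted
--
--     Args:
--         new_files: dict of local files, per local_fileinfo(...)
--         old_files: dict of previous files, per remote_fileinfo(...)
--
--     Returns:
--         dict of:
--             {create: {<fileinfo>}, update: {<fileinfo>}, delete: {<fileinfo>}}
--     """
--     actions = {"create": {}, "update": {}, "delete": {}}
--
--     for filename, data in new_files.items():
--
--         if filename == "datapackage.json":
--             continue
--
--         if filename not in old_files: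
--             actions["create"][filename] = data
--         elif data["checksum"] != old_files[filename]["checksum"]:
--             actions["update"][filename] = old_files[filename]
--             actions["update"][filename]["path"] = data["path"]
--
--     for filename, data in old_files.items():
--
--         if filename == "datapackage.json":
--             continue
--
--         if filename not in new_files:
--             actions["delete"][filename] = data
--
--     return actions
-- ===== SOURCE B (Python) =====
-- def action_steps(new_files, old_files):
--     # Hash-join: merge both dicts into one index key -> (new_entry_or_None, old_entry_or_None),
--     # then classify every key in a single pass over the merged index.
--     merged = {}
--     for filename, data in new_files.items():
--         merged[filename] = (data, None)
--     for filename, data in old_files.items():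
--         if filename in merged:
--             merged[filename] = (merged[filename][0], data)
--         else:
--             merged[filename] = (None, data)
--
--     actions = {"create": {}, "update": {}, "delete": {}}
--     for filename, (new, old) in merged.items():
--         if filename == "datapackage.json":
--             continue
--         if old is None:
--             actions["create"][filename] = new
--         elif new is None:
--             actions["delete"][filename] = old
--         elif new["checksum"] != old["checksum"]:
--             actions["update"][filename] = old
--             old["path"] = new["path"]
--     return actions
-- ===== Notes on version B (the rewrite author's own statement) =====
-- stated objective: alternative
-- what changed: Instead of A's two membership-testing loops over each dict, B first hash-joins the two dicts into one merged index key -> (new_entry|None, old_entry|None) and then classifies every key in a single pass over that index by pattern-matching on which sides are present; B also performs A's in-place mutation of old_files[filename]['path'].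
import Mathlib
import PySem

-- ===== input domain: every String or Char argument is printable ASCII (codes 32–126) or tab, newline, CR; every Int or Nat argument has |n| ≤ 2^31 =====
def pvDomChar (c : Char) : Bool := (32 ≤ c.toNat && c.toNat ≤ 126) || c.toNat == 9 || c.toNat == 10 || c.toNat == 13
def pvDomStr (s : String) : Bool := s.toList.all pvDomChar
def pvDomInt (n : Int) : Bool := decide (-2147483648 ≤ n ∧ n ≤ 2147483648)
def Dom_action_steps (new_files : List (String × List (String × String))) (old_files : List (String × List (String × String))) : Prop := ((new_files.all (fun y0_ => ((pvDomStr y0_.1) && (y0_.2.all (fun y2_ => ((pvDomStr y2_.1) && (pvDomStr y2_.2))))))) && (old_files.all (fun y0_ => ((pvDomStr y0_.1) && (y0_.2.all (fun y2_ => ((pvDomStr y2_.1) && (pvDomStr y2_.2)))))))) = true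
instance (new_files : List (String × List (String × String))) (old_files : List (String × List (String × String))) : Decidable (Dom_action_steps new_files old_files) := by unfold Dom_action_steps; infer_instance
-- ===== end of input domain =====

-- B replaces A's two membership-testing loops by a hash-join: one merged index
-- key -> (new entry?, old entry?) built first, then a single classification pass over it.
-- Return values agree; both Pythons mutate old_files[filename]["path"] in place identically.

abbrev FEntry := List (String × String)

-- ===== PORT A =====
-- A's loop over new_files carries the pair (create, update); the second loop builds delete.
-- data["checksum"] / old_files[filename]["checksum"] / data["path"] raise KeyError when the key is
-- missing: Pre_ excludes exactly those inputs; the port totalises the comparison on Option values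
-- and the "path" read with getD (never reached under Pre_ with a differing getD).
def stepA_cu (old_files : List (String × FEntry))
    (acc : PySem.Dict String FEntry × PySem.Dict String FEntry)
    (p : String × FEntry) :
    PySem.Dict String FEntry × PySem.Dict String FEntry :=
  if p.1 == "datapackage.json" then acc
  else if !((PySem.Dict.mk old_files).contains p.1) then (acc.1.insert p.1 p.2, acc.2)
  else if (PySem.Dict.mk p.2).get? "checksum" != (PySem.Dict.mk ((PySem.Dict.mk old_files).getD p.1 [])).get? "checksum" then
    (acc.1, acc.2.insert p.1
      (((PySem.Dict.mk ((PySem.Dict.mk old_files).getD p.1 [])).insert "path"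
          ((PySem.Dict.mk p.2).getD "path" "")).items))
  else acc

def action_steps (new_files : List (String × List (String × String))) (old_files : List (String × List (String × String))) : List (String × List (String × List (String × String))) :=
  let cu := new_files.foldl (stepA_cu old_files) (PySem.Dict.empty, PySem.Dict.empty)
  let del := old_files.foldl (fun (acc : PySem.Dict String FEntry) p =>
      if p.1 == "datapackage.json" then acc
      else if !((PySem.Dict.mk new_files).contains p.1) then acc.insert p.1 p.2
      else acc) PySem.Dict.empty
  [("create", cu.1.items), ("update", cu.2.items), ("delete", del.items)]

-- ===== PORT B =====
-- Source B's first loop: merged[filename] = (data, None)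
def pvMergeNew (m : PySem.Dict String (Option FEntry × Option FEntry)) (p : String × FEntry) :
    PySem.Dict String (Option FEntry × Option FEntry) :=
  m.insert p.1 (some p.2, none)

-- Source B's second loop: fill the old side of an existing pair, else append (None, data)
def pvMergeOld (m : PySem.Dict String (Option FEntry × Option FEntry)) (p : String × FEntry) :
    PySem.Dict String (Option FEntry × Option FEntry) :=
  if m.contains p.1 then m.insert p.1 ((m.getD p.1 (none, none)).1, some p.2)
  else m.insert p.1 (none, some p.2)

-- Source B's classification pass over merged.items(); the update value is the old entry with
-- its "path" overwritten by the new entry's "path" (the in-place mutation's final value)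
def pvClassify
    (acc : PySem.Dict String FEntry × PySem.Dict String FEntry × PySem.Dict String FEntry)
    (q : String × (Option FEntry × Option FEntry)) :
    PySem.Dict String FEntry × PySem.Dict String FEntry × PySem.Dict String FEntry :=
  if q.1 == "datapackage.json" then acc
  else
    match q.2 with
    | (some nv, none) => (acc.1.insert q.1 nv, acc.2)
    | (none, some ov) => (acc.1, acc.2.1, acc.2.2.insert q.1 ov)
    | (some nv, some ov) =>
        if (PySem.Dict.mk nv).get? "checksum" != (PySem.Dict.mk ov).get? "checksum" then
          (acc.1, acc.2.1.insert q.1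
            (((PySem.Dict.mk ov).insert "path" ((PySem.Dict.mk nv).getD "path" "")).items),
           acc.2.2)
        else acc
    | (none, none) => acc

def action_steps_alt (new_files : List (String × List (String × String))) (old_files : List (String × List (String × String))) : List (String × List (String × List (String × String))) :=
  let merged := old_files.foldl pvMergeOld (new_files.foldl pvMergeNew PySem.Dict.empty)
  let acts := merged.items.foldl pvClassify (PySem.Dict.empty, PySem.Dict.empty, PySem.Dict.empty)
  [("create", acts.1.items), ("update", acts.2.1.items), ("delete", acts.2.2.items)]

-- ===== PRECONDITION & SPEC =====
-- Pre_ excludes (a) association lists with duplicate keys (outer or inner) — a Python dict cannot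
-- contain them, so they represent no Python input at all — and (b) inputs where a common
-- non-datapackage file lacks a "checksum" key, or lacks "path" in its new entry while the
-- checksums differ: there Python A raises KeyError (and so does B).
def Pre_action_steps (new_files : List (String × List (String × String))) (old_files : List (String × List (String × String))) : Prop :=
  (new_files.map Prod.fst).Nodup ∧ (old_files.map Prod.fst).Nodup ∧
  (∀ p ∈ new_files, (p.2.map Prod.fst).Nodup) ∧ (∀ p ∈ old_files, (p.2.map Prod.fst).Nodup) ∧
  (∀ p ∈ new_files, p.1 ≠ "datapackage.json" → ∀ q ∈ old_files, q.1 = p.1 →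
    ("checksum" ∈ p.2.map Prod.fst ∧ "checksum" ∈ q.2.map Prod.fst ∧
     ((PySem.Dict.mk p.2).get? "checksum" ≠ (PySem.Dict.mk q.2).get? "checksum" →
       "path" ∈ p.2.map Prod.fst)))
instance (new_files : List (String × List (String × String))) (old_files : List (String × List (String × String))) : Decidable (Pre_action_steps new_files old_files) := by unfold Pre_action_steps; infer_instance

def pvWitness_action_steps : (List (String × List (String × String))) × (List (String × List (String × String))) :=
  ([("a.txt", [("checksum", "1"), ("path", "x")]), ("b.txt", [("checksum", "2"), ("path", "y")])],
   [("b.txt", [("checksum", "3"), ("path", "z")]), ("c.txt", [("checksum", "4"), ("path", "w")])])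

def Spec_action_steps (new_files : List (String × List (String × String))) (old_files : List (String × List (String × String))) (out : List (String × List (String × List (String × String)))) : Prop := out = action_steps_alt new_files old_files
instance (new_files : List (String × List (String × String))) (old_files : List (String × List (String × String))) (out : List (String × List (String × List (String × String)))) : Decidable (Spec_action_steps new_files old_files out) := by unfold Spec_action_steps; infer_instance

-- ===== CLAIM (what is proved, stated in full; the proofs are below) =====
def Claim_equal_action_steps : Prop := ∀ (new_files : List (String × List (String × String))) (old_files : List (String × List (String × String))), Dom_action_steps new_files old_files → Pre_action_steps new_files old_files → Spec_action_steps new_files old_files (action_steps new_files old_files)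

-- ===== LEMMAS AND PROOFS =====

-- the pair q of the merged index with its old side filled in from the l still to be processed
def pvPatch (l : List (String × FEntry)) (q : String × (Option FEntry × Option FEntry)) :
    String × (Option FEntry × Option FEntry) :=
  (q.1, (q.2.1, ((PySem.Dict.mk l).get? q.1).elim q.2.2 some))

theorem merged0_items (new_files : List (String × FEntry))
    (h : (new_files.map Prod.fst).Nodup) :
    (new_files.foldl pvMergeNew PySem.Dict.empty).items
      = new_files.map (fun p => (p.1, ((some p.2 : Option FEntry), (none : Option FEntry)))) := by
  have := PySem.Dict.items_foldl_insert_fresh new_files Prod.fst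
      (fun p => ((some p.2 : Option FEntry), (none : Option FEntry))) PySem.Dict.empty
      (fun a _ => by simp [PySem.Dict.contains_empty]) h
  simpa [pvMergeNew] using this

theorem merged0_keys_nodup (new_files : List (String × FEntry))
    (_h : (new_files.map Prod.fst).Nodup) :
    (new_files.foldl pvMergeNew PySem.Dict.empty).keys.Nodup := by
  have := PySem.Dict.nodup_keys_foldl_insert_key new_files Prod.fst
      (fun _ p => ((some p.2 : Option FEntry), (none : Option FEntry))) PySem.Dict.empty
      (by simp)
  simpa [pvMergeNew] using this

theorem merged0_contains (new_files : List (String × FEntry)) (k : String) :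
    (new_files.foldl pvMergeNew PySem.Dict.empty).contains k
      = (PySem.Dict.mk new_files).contains k := by
  rw [Bool.eq_iff_iff, PySem.Dict.contains_iff_mem_keys, PySem.Dict.contains_iff_mem_keys]
  have := PySem.Dict.keys_foldl_insert_key new_files Prod.fst
      (fun _ p => ((some p.2 : Option FEntry), (none : Option FEntry))) PySem.Dict.empty
  rw [show (new_files.foldl pvMergeNew PySem.Dict.empty)
        = new_files.foldl (fun d x => d.insert x.1 (some x.2, none)) PySem.Dict.empty from rfl]
  rw [this]
  simp [PySem.Set.mem_update, PySem.Dict.keys_mk, PySem.Dict.keys_empty]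

theorem mergeOld_items (l : List (String × FEntry))
    (m : PySem.Dict String (Option FEntry × Option FEntry))
    (hm : m.keys.Nodup) (hl : (l.map Prod.fst).Nodup) :
    (l.foldl pvMergeOld m).items
      = m.items.map (pvPatch l)
        ++ (l.filter (fun p => !(m.contains p.1))).map
             (fun p => (p.1, ((none : Option FEntry), some p.2))) := by
  induction l generalizing m with
  | nil =>
      simp only [List.foldl_nil, List.filter_nil, List.map_nil, List.append_nil]
      have h1 : List.map (pvPatch []) m.items = List.map id m.items :=
        List.map_congr_left (fun q _ => by
          have h0 : ({ items := ([] : List (String × FEntry)) } : PySem.Dict String FEntry).get? q.1 = none := rfl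
          simp [pvPatch, h0])
      rw [h1, List.map_id]
  | cons p l ih =>
      obtain ⟨p1, p2⟩ := p
      simp only [List.map_cons, List.nodup_cons, List.mem_map] at hl
      obtain ⟨hp, hl⟩ := hl
      have hp' : ∀ x ∈ l, x.1 ≠ p1 := fun x hx h => hp ⟨x, hx, h⟩
      have hpl : ({ items := l } : PySem.Dict String FEntry).get? p1 = none := by
        rw [PySem.Dict.get?_eq_none_iff_not_mem_keys, PySem.Dict.keys_mk]
        intro hmem
        obtain ⟨x, hx, hx1⟩ := List.mem_map.mp hmem
        exact hp' x hx hx1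
      simp only [List.foldl_cons, pvMergeOld]
      by_cases hc : m.contains p1 = true
      · rw [if_pos hc, ih _ (PySem.Dict.nodup_keys_insert _ _ _ hm) hl]
        have hfil : List.filter (fun x => !(m.insert p1 ((m.getD p1 (none, none)).1, some p2)).contains x.1) l
            = List.filter (fun x => !m.contains x.1) l := by
          apply List.filter_congr
          intro x hx
          have hx1 : (x.1 == p1) = false := by simpa using hp' x hx
          rw [PySem.Dict.contains_insert, hx1, Bool.false_or]
        rw [hfil, List.filter_cons_of_neg (by simp [hc])]
        congr 1
        rw [PySem.Dict.items_insert_of_contains _ _ hc, List.map_map]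
        apply List.map_congr_left
        intro q hq
        simp only [Function.comp]
        by_cases hq1 : q.1 = p1
        · have hgd : m.getD p1 (none, none) = q.2 := by
            have : (p1, q.2) ∈ m.items := by rw [← hq1]; exact hq
            exact PySem.Dict.getD_of_mem_items _ this hm _
          have hbe : (q.1 == p1) = true := by simpa using hq1
          have hbe2 : (p1 == q.1) = true := by simpa using hq1.symm
          simp [pvPatch, hgd, PySem.Dict.get?_mk_cons, hpl, hq1, hbe2]
        · have hbe : (q.1 == p1) = false := by simpa using hq1
          have hbe' : (p1 == q.1) = false := by simpa using fun h => hq1 h.symm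
          simp only [hbe, Bool.false_eq_true, if_false, pvPatch, PySem.Dict.get?_mk_cons, hbe']
      · have hcf : m.contains p1 = false := by simpa using hc
        rw [if_neg hc, ih _ (PySem.Dict.nodup_keys_insert _ _ _ hm) hl]
        rw [PySem.Dict.items_insert_of_not_contains _ _ hcf, List.map_append]
        rw [List.filter_cons_of_pos (by simp [hcf]), List.map_cons]
        rw [List.append_assoc]
        have hfil : List.filter (fun x => !(m.insert p1 ((none : Option FEntry), some p2)).contains x.1) l
            = List.filter (fun x => !m.contains x.1) l := by
          apply List.filter_congr
          intro x hx
          have hx1 : (x.1 == p1) = false := by simpa using hp' x hx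
          rw [PySem.Dict.contains_insert, hx1, Bool.false_or]
        rw [hfil]
        congr 1
        · apply List.map_congr_left
          intro q hq
          have hne : q.1 ≠ p1 := by
            intro h
            have hk : q.1 ∈ m.keys := PySem.Dict.mem_keys_of_mem_items _ hq
            rw [h, ← PySem.Dict.contains_iff_mem_keys] at hk
            simp [hcf] at hk
          have hbe' : (p1 == q.1) = false := by simpa using fun h => hne h.symm
          simp only [pvPatch, PySem.Dict.get?_mk_cons, hbe', Bool.false_eq_true, if_false]
        · simp [pvPatch, hpl]

theorem classify_step (old_files : List (String × FEntry))
    (c u d : PySem.Dict String FEntry) (p : String × FEntry) :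
    pvClassify (c, u, d) (p.1, (some p.2, (PySem.Dict.mk old_files).get? p.1))
      = ((stepA_cu old_files (c, u) p).1, (stepA_cu old_files (c, u) p).2, d) := by
  unfold pvClassify stepA_cu
  rcases hg : (PySem.Dict.mk old_files).get? p.1 with _ | ov
  · have hcont : (PySem.Dict.mk old_files).contains p.1 = false := by
      rw [PySem.Dict.contains_eq_isSome_get?, hg]; rfl
    simp only [hcont, Bool.not_false, if_true]
    split_ifs <;> rfl
  · have hcont : (PySem.Dict.mk old_files).contains p.1 = true := by
      rw [PySem.Dict.contains_eq_isSome_get?, hg]; rfl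
    have hgd : (PySem.Dict.mk old_files).getD p.1 [] = ov := by
      rw [PySem.Dict.getD_eq_get?_getD, hg]; rfl
    simp only [hcont, hgd, Bool.not_true, Bool.false_eq_true, if_false]
    split_ifs <;> simp_all

theorem classify_part1 (new_files old_files : List (String × FEntry))
    (c u d : PySem.Dict String FEntry) :
    (new_files.map (fun p => (p.1, ((some p.2 : Option FEntry), (PySem.Dict.mk old_files).get? p.1)))).foldl
        pvClassify (c, u, d)
      = ((new_files.foldl (stepA_cu old_files) (c, u)).1,
         (new_files.foldl (stepA_cu old_files) (c, u)).2, d) := by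
  induction new_files generalizing c u with
  | nil => rfl
  | cons p t ih =>
      simp only [List.map_cons, List.foldl_cons, classify_step]
      exact ih (stepA_cu old_files (c, u) p).1 (stepA_cu old_files (c, u) p).2

theorem classify_part2 (new_files old_files : List (String × FEntry))
    (c u d : PySem.Dict String FEntry) :
    ((old_files.filter (fun p => !((PySem.Dict.mk new_files).contains p.1))).map
        (fun p => (p.1, ((none : Option FEntry), some p.2)))).foldl pvClassify (c, u, d)
      = (c, u, old_files.foldl (fun (acc : PySem.Dict String FEntry) p =>
            if p.1 == "datapackage.json" then acc
            else if !((PySem.Dict.mk new_files).contains p.1) then acc.insert p.1 p.2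
            else acc) d) := by
  induction old_files generalizing d with
  | nil => rfl
  | cons p t ih =>
      by_cases hc : ((PySem.Dict.mk new_files).contains p.1) = true
      · rw [List.filter_cons_of_neg (by simp [hc])]
        simp only [List.foldl_cons, hc, Bool.not_true, Bool.false_eq_true, if_false, ite_self]
        exact ih d
      · have hcf : (PySem.Dict.mk new_files).contains p.1 = false := by
          rwa [Bool.not_eq_true] at hc
        rw [List.filter_cons_of_pos (by simp [hcf]), List.map_cons]
        simp only [List.foldl_cons, pvClassify, hcf, Bool.not_false, if_true]
        by_cases hdp : (p.1 == "datapackage.json") = true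
        · simp only [hdp, if_true]
          exact ih d
        · have : (p.1 == "datapackage.json") = false := by simpa using hdp
          simp only [this, Bool.false_eq_true, if_false]
          exact ih (d.insert p.1 p.2)

theorem main_eq (new_files old_files : List (String × List (String × String)))
    (hn : (new_files.map Prod.fst).Nodup) (ho : (old_files.map Prod.fst).Nodup) :
    action_steps new_files old_files = action_steps_alt new_files old_files := by
  simp only [action_steps, action_steps_alt]
  rw [mergeOld_items old_files _ (merged0_keys_nodup new_files hn) ho,
      merged0_items new_files hn]
  have hfil : (old_files.filter (fun p => !(new_files.foldl pvMergeNew PySem.Dict.empty).contains p.1))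
      = old_files.filter (fun p => !((PySem.Dict.mk new_files).contains p.1)) := by
    simp only [merged0_contains]
  rw [hfil, List.map_map]
  have hmap : (pvPatch old_files) ∘ (fun (p : String × FEntry) => (p.1, ((some p.2 : Option FEntry), (none : Option FEntry))))
      = fun p => (p.1, ((some p.2 : Option FEntry), (PySem.Dict.mk old_files).get? p.1)) := by
    funext p
    simp only [Function.comp, pvPatch]
    cases h : (PySem.Dict.mk old_files).get? p.1 <;> simp
  rw [hmap, List.foldl_append, classify_part1, classify_part2]

-- ===== VERDICT (by name: the statement is the Claim_ definition above) =====
theorem action_steps_spec : Claim_equal_action_steps := by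
  intro new_files old_files _ hpre
  obtain ⟨hn, ho, -, -, -⟩ := hpre
  exact main_eq new_files old_files hn ho
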